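-- pv_equiv track=rewrite | github.com/Andrei-BM/Python | Lesson_03/task06.py | check_func
-- ===== SOURCE A (Python) =====
-- def check_func(x):
--     check_list = [33, 44, 46, 58, 59, 63] # Список символов пунктуации
--     for i in x:
--         code = ord(i)                         # Переводим символы в цифры кодировки
--         if code in range(97, 123) or code in check_list: # Проверяем есть ли в слове хоть один неверный символ.
--             pass
--         else:
--             x = None                                     # Если есть возвращаем None и прерываем цикл.
--             break
--     return x
-- ===== SOURCE B (Python) =====
-- def check_func(x):
--     def ok(lo, hi):
--         # divide-and-conquer over the index interval [lo, hi)
--         if hi <= lo: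
--             return True
--         if hi == lo + 1:
--             c = x[lo]
--             return 'a' <= c <= 'z' or c in '!,.:;?'
--         mid = (lo + hi) // 2
--         return ok(lo, mid) and ok(mid, hi)
--     return x if ok(0, len(x)) else None
-- ===== Notes on version B (the rewrite author's own statement) =====
-- stated objective: alternative
-- what changed: Replaces A's linear scan with early break by a divide-and-conquer recursion that splits the index interval in halves, validates each half, and conjoins the two results.
import Mathlib
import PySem

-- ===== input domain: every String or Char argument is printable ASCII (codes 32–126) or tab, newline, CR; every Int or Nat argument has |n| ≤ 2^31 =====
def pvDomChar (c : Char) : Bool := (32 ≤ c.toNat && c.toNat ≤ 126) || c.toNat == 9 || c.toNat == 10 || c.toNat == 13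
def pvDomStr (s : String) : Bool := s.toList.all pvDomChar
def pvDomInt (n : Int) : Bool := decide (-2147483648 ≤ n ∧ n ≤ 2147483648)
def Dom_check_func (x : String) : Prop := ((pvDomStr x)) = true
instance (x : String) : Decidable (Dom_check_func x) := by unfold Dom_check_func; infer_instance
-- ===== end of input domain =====

-- B replaces A's linear scan-with-break by a divide-and-conquer recursion on
-- index halves (objective: alternative decomposition, same O(n) cost).

-- ===== PORT A =====
-- the for-loop with break: scans chars, on first bad char sets x = None and breaks
def check_func_loop (x : String) : List Char → Option String
  | [] => some x
  | c :: rest =>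
    let code : Int := (c.toNat : Int)
    -- 'code in range(97,123)' ported as the bounds test (exact for step 1)
    if (97 ≤ code ∧ code < 123) ∨ code ∈ ([33, 44, 46, 58, 59, 63] : List Int) then
      check_func_loop x rest
    else
      none

def check_func (x : String) : Option String := check_func_loop x x.toList

-- ===== PORT B =====
-- single-character test: 'a' <= c <= 'z' or c in '!,.:;?'
def bAllowed (c : Char) : Bool := ('a' ≤ c && c ≤ 'z') || "!,.:;?".toList.contains c

-- ok(lo, hi): divide-and-conquer over the index interval [lo, hi)
def check_ok (l : List Char) (lo hi : Nat) : Bool :=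
  if hi ≤ lo then true
  else if hi = lo + 1 then bAllowed (l.getD lo ' ')
  else check_ok l lo ((lo + hi) / 2) && check_ok l ((lo + hi) / 2) hi
termination_by hi - lo
decreasing_by all_goals omega

def check_func_alt (x : String) : Option String :=
  if check_ok x.toList 0 x.toList.length then some x else none

-- ===== PRECONDITION & SPEC =====
def Spec_check_func (x : String) (out : Option String) : Prop := out = check_func_alt x
instance (x : String) (out : Option String) : Decidable (Spec_check_func x out) := by unfold Spec_check_func; infer_instance

-- ===== CLAIM (what is proved, stated in full; the proofs are below) =====
def Claim_equal_check_func : Prop := ∀ (x : String), Dom_check_func x → Spec_check_func x (check_func x)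

-- ===== LEMMAS AND PROOFS =====

-- B's character test agrees with A's numeric test
lemma allowed_iff (c : Char) :
    bAllowed c = true ↔
      ((97 ≤ (c.toNat : Int) ∧ (c.toNat : Int) < 123) ∨
        (c.toNat : Int) ∈ ([33, 44, 46, 58, 59, 63] : List Int)) := by
  have hc : ∀ d : Char, (c = d) ↔ c.toNat = d.toNat := by
    intro d
    constructor
    · intro h; rw [h]
    · intro h; exact Char.ext (by simpa [Char.toNat] using UInt32.toNat_inj.mp h)
  have hle : ∀ d e : Char, (d ≤ e) ↔ d.toNat ≤ e.toNat := by
    intro d e; rw [Char.le_def, UInt32.le_iff_toNat_le]; rfl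
  simp only [bAllowed, Bool.or_eq_true, Bool.and_eq_true, decide_eq_true_eq,
    List.contains_eq_mem, List.mem_cons, List.not_mem_nil, or_false,
    show ("!,.:;?".toList) = ['!', ',', '.', ':', ';', '?'] from rfl, hc, hle]
  simp only [show ('a' : Char).toNat = 97 from rfl, show ('z' : Char).toNat = 122 from rfl,
    show ('!' : Char).toNat = 33 from rfl, show (',' : Char).toNat = 44 from rfl,
    show ('.' : Char).toNat = 46 from rfl, show (':' : Char).toNat = 58 from rfl,
    show (';' : Char).toNat = 59 from rfl, show ('?' : Char).toNat = 63 from rfl]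
  omega

-- A's loop returns some x iff every char passes B's test
lemma loop_eq (x : String) (l : List Char) :
    check_func_loop x l = if l.all bAllowed then some x else none := by
  induction l with
  | nil => simp [check_func_loop]
  | cons c rest ih =>
    simp only [check_func_loop, List.all_cons]
    by_cases h : bAllowed c = true
    · rw [if_pos ((allowed_iff c).mp h)]
      simp [h, ih]
    · rw [if_neg (fun hn => h ((allowed_iff c).mpr hn))]
      simp [h]

-- the divide-and-conquer validates exactly the interval [lo, hi)
lemma ok_iff (l : List Char) :
    ∀ n lo hi, hi - lo ≤ n →
      (check_ok l lo hi = true ↔ ∀ i, lo ≤ i → i < hi → bAllowed (l.getD i ' ') = true) := by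
  intro n
  induction n with
  | zero =>
    intro lo hi h
    rw [check_ok, if_pos (by omega)]
    constructor
    · intro _ i h1 h2; omega
    · intro _; rfl
  | succ n ih =>
    intro lo hi h
    rw [check_ok]
    by_cases h0 : hi ≤ lo
    · rw [if_pos h0]
      constructor
      · intro _ i h1 h2; omega
      · intro _; rfl
    · rw [if_neg h0]
      by_cases h1 : hi = lo + 1
      · rw [if_pos h1]
        subst h1
        constructor
        · intro hb i hi1 hi2
          have : i = lo := by omega
          simpa [this] using hb
        · intro hall; exact hall lo (le_refl _) (by omega)
      · rw [if_neg h1]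
        rw [Bool.and_eq_true, ih lo ((lo + hi) / 2) (by omega), ih ((lo + hi) / 2) hi (by omega)]
        constructor
        · rintro ⟨ha, hb⟩ i hi1 hi2
          by_cases hm : i < (lo + hi) / 2
          · exact ha i hi1 hm
          · exact hb i (by omega) hi2
        · intro hall
          exact ⟨fun i a b => hall i a (by omega), fun i a b => hall i (by omega) b⟩

lemma all_iff_getD (l : List Char) :
    l.all bAllowed = true ↔ ∀ i, 0 ≤ i → i < l.length → bAllowed (l.getD i ' ') = true := by
  rw [List.all_eq_true]
  constructor
  · intro h i _ hi
    exact h (l.getD i ' ') (by rw [List.getD_eq_getElem _ _ hi]; exact List.getElem_mem hi)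
  · intro h c hc
    obtain ⟨i, hi, rfl⟩ := List.getElem_of_mem hc
    rw [← List.getD_eq_getElem _ ' ' hi]
    exact h i (Nat.zero_le _) hi

-- ===== VERDICT (by name: the statement is the Claim_ definition above) =====
theorem check_func_spec : Claim_equal_check_func := by
  intro x _
  unfold Spec_check_func check_func check_func_alt
  rw [loop_eq]
  rw [show check_ok x.toList 0 x.toList.length
        = x.toList.all bAllowed from by
      rw [Bool.eq_iff_iff, ok_iff x.toList x.toList.length 0 x.toList.length (by omega),
        all_iff_getD]]
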